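-- pv_equiv track=rewrite | github.com/richard-flint/wordle_solver | wordle_solver/helper_functions/step_3_update_lists/generate_updated_list.py | add_letter_to_orange_letters
-- ===== SOURCE A (Python) =====
-- def add_letter_to_orange_letters(trial_word,specific_letter,orange_letters,red_or_orange_columns,i,score):
--
--     #For the specific orange letter, record that it is a possible option for all columns that are either
--     #red or orange, but not for columns that are green, since those columns are already decided
--     orange_letters[specific_letter]=red_or_orange_columns.copy()
--
--     #Remove the current column from the list, as we know that the specific letter is not correct
--     #for the current column (otherwise it would be green...!)
--     orange_letters[specific_letter].remove(i)
--
--     #Check if the specific orange letter appears more than once in the trial word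
--     if trial_word.count(specific_letter)>1:
--
--         #If the specific letter does appear more than once, find the colours and locations
--         #of the specific orange letter elsewhere in the word
--         locations_of_repeated_letters=[]
--         colours_of_repeat_letters=[]
--
--         #Iterate through all letters in trial word
--         for k in range(5):
--
--             #Get letter in trial word
--             letter_in_trial_word=trial_word[k]
--
--             #Check if letter in trial word is same as specific orange letter, and that the column is not same as
--             #current column for the specific orange letter
--             if (letter_in_trial_word==specific_letter and i!=k):
--                 locations_of_repeated_letters.append(k)
--                 colours_of_repeat_letters.append(score[k])
--
--         #If there is one or more repeated letter that is "Green"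
--         if "Green" in colours_of_repeat_letters:
--             #Remove letter from orange letters dictionary, since the "Orange" in the current column is covered
--             #by the "Green" in the repeated column
--             orange_letters.pop(specific_letter)
--
--         #If there is one or more repeated letters that is "Orange" or "Red"
--         elif ("Orange" in colours_of_repeat_letters or "Red" in colours_of_repeat_letters):
--
--             #Loop through repeated letters, and remove any locations from "orange_letters" list
--             #where the repeated letters are either "Orange" or "Red". Note: technically we should
--             #not need to do this for "Red", since the same letter should not appear as "Orange" and
--             #"Red" in the same set of scores, but included here for completeness/additional security.
--             count=0
--             for colour in colours_of_repeat_letters: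
--                 if (colour == "Orange" or colour == "Red"):
--
--                     #Get column number to remove from "orange_letters" list
--                     column_to_remove=locations_of_repeated_letters[count]
--
--                     #Remove column number from "orange_letters" list
--                     orange_letters[specific_letter].remove(column_to_remove)
--
--                 #Add one to count
--                 count+=1
--
--     #Return orange letters dictionary
--     return orange_letters
-- ===== SOURCE B (Python) =====
-- def add_letter_to_orange_letters(trial_word,specific_letter,orange_letters,red_or_orange_columns,i,score):
--     # Declarative reformulation: collect the repeat columns once via enumerate/zip,
--     # then produce the candidate list by a single set-subtraction pass instead of
--     # A's dict mutation plus repeated list.remove calls.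
--     reps = []
--     if trial_word.count(specific_letter) > 1:
--         reps = [(k, col) for k, (ch, col) in enumerate(zip(trial_word[:5], score))
--                 if ch == specific_letter and k != i]
--     if any(col == "Green" for _, col in reps):
--         orange_letters.pop(specific_letter, None)
--     else:
--         need = {k for k, col in reps if col in ("Orange", "Red")}
--         need.add(i)
--         out = []
--         for c in red_or_orange_columns:
--             if c in need:
--                 need.discard(c)
--             else:
--                 out.append(c)
--         orange_letters[specific_letter] = out
--     return orange_letters
-- ===== Notes on version B (the rewrite author's own statement) =====
-- stated objective: alternative
-- what changed: A mutates the dict then performs repeated list.remove calls driven by parallel locations/colours lists and a count index; B instead builds the repeat (column,colour) pairs declaratively with enumerate(zip(...)), decides the green case with any(), and produces the final candidate list in one set-subtraction pass over red_or_orange_columns (no .remove, no pop on the list).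
import Mathlib
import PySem

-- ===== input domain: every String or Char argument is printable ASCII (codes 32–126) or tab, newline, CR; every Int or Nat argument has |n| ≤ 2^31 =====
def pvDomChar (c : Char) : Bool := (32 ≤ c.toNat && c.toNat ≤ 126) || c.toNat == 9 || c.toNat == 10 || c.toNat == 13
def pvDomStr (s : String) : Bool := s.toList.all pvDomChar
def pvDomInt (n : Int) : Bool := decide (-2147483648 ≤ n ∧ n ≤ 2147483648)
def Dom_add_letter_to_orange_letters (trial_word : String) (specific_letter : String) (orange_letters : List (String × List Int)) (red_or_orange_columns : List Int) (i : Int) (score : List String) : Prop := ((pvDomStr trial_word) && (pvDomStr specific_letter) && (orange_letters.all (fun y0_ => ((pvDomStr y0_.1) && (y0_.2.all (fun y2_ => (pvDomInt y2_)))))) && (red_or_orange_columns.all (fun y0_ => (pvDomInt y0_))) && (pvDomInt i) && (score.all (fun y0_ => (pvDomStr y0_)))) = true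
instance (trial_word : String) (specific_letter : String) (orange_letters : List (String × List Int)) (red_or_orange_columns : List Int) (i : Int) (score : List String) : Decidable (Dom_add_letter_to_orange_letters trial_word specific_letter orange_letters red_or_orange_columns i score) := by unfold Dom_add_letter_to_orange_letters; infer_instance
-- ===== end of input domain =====

-- B collects the repeat (column, colour) pairs declaratively with enumerate(zip(...)) and builds the
-- final candidate list in one set-subtraction pass, instead of A's dict mutation plus repeated
-- list.remove calls driven by parallel lists and a count index (objective: alternative).
-- Equivalence is about the RETURN value; the Python A mutates the orange_letters dict in place
-- (B performs the same mutation).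

-- ===== PORT A =====
-- A's scan over range(5): builds (locations, colours).  score[k] is read with getD "" — inside
-- Pre_ every read index is < score.length, so the default is never used; pyGet? none (IndexError
-- in Python, excluded by Pre_) leaves the accumulator unchanged.
def add_letter_to_orange_letters (trial_word : String) (specific_letter : String) (orange_letters : List (String × List Int)) (red_or_orange_columns : List Int) (i : Int) (score : List String) : List (String × List Int) :=
  -- orange_letters[specific_letter] = red_or_orange_columns.copy()
  let d1 := (PySem.Dict.mk orange_letters).insert specific_letter red_or_orange_columns
  -- orange_letters[specific_letter].remove(i)   (ValueError when i absent: excluded by Pre_)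
  match PySem.List.remove? red_or_orange_columns i with
  | none => orange_letters
  | some lst =>
    let d2 := d1.insert specific_letter lst
    if PySem.Str.count trial_word specific_letter > 1 then
      let scan := (List.range 5).foldl (fun (acc : List Int × List String) (k : Nat) =>
        match PySem.List.pyGet? trial_word.toList (k : Int) with
        | none => acc
        | some letter_in_trial_word =>
          if ([letter_in_trial_word] == specific_letter.toList) && (i != (k : Int)) then
            (acc.1 ++ [(k : Int)], acc.2 ++ [score.getD k ""])
          else acc) ([], [])
      let locations_of_repeated_letters := scan.1
      let colours_of_repeat_letters := scan.2
      if "Green" ∈ colours_of_repeat_letters then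
        (d2.erase specific_letter).items
      else if "Orange" ∈ colours_of_repeat_letters ∨ "Red" ∈ colours_of_repeat_letters then
        let res := colours_of_repeat_letters.foldl (fun (st : Nat × Option (List Int)) colour =>
          (st.1 + 1,
           if colour == "Orange" || colour == "Red" then
             match st.2 with
             | none => none
             | some l => PySem.List.remove? l (locations_of_repeated_letters.getD st.1 0)
           else st.2)) (0, some lst)
        match res.2 with
        | none => orange_letters
        | some l => (d2.insert specific_letter l).items
      else d2.items
    else d2.items

-- ===== PORT B =====
def add_letter_to_orange_letters_alt (trial_word : String) (specific_letter : String) (orange_letters : List (String × List Int)) (red_or_orange_columns : List Int) (i : Int) (score : List String) : List (String × List Int) :=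
  -- reps = [(k, col) for k, (ch, col) in enumerate(zip(trial_word[:5], score)) if ch == specific_letter and k != i]
  let reps : List (Int × String) :=
    if PySem.Str.count trial_word specific_letter > 1 then
      ((PySem.List.enumerate ((PySem.Str.slice trial_word none (some 5)).toList.zip score)).filter
        (fun p => ([p.2.1] == specific_letter.toList) && (p.1 != i))).map (fun p => (p.1, p.2.2))
    else []
  if reps.any (fun p => p.2 == "Green") then
    -- orange_letters.pop(specific_letter, None)
    ((PySem.Dict.mk orange_letters).erase specific_letter).items
  else
    -- need = {k for k, col in reps if col in ("Orange","Red")}; need.add(i)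
    let need : PySem.Set Int :=
      PySem.Set.add (PySem.Set.ofList ((reps.filter (fun p => p.2 == "Orange" || p.2 == "Red")).map (·.1))) i
    -- one pass: keep c unless it is still needed, discarding each needed value once
    let out := (red_or_orange_columns.foldl (fun (st : PySem.Set Int × List Int) c =>
      if PySem.Set.contains st.1 c then (PySem.Set.discard st.1 c, st.2)
      else (st.1, st.2 ++ [c])) (need, [])).2
    ((PySem.Dict.mk orange_letters).insert specific_letter out).items

-- ===== PRECONDITION & SPEC =====
-- the columns (< 5, ≠ i) where trial_word repeats specific_letter
def pvReps (trial_word : String) (specific_letter : String) (i : Int) : List Nat :=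
  (List.range 5).filter (fun k =>
    ([trial_word.toList.getD k ' '] == specific_letter.toList) && (i != (k : Int)))

-- Pre_ excludes exactly the inputs where the Python A raises: ValueError when i is not in
-- red_or_orange_columns; and, when specific_letter occurs more than once in trial_word,
-- IndexError when trial_word or (at a repeat column) score has no index k < 5, and ValueError
-- when a repeat column scored Orange/Red (with no Green repeat) is absent from the candidate list.
def Pre_add_letter_to_orange_letters (trial_word : String) (specific_letter : String) (orange_letters : List (String × List Int)) (red_or_orange_columns : List Int) (i : Int) (score : List String) : Prop :=
  i ∈ red_or_orange_columns ∧
  (PySem.Str.count trial_word specific_letter > 1 →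
    5 ≤ trial_word.toList.length ∧
    (∀ k ∈ pvReps trial_word specific_letter i, k < score.length) ∧
    ((¬ ∃ k ∈ pvReps trial_word specific_letter i, score.getD k "" = "Green") →
      ∀ k ∈ pvReps trial_word specific_letter i,
        (score.getD k "" = "Orange" ∨ score.getD k "" = "Red") → (k : Int) ∈ red_or_orange_columns))
instance (trial_word : String) (specific_letter : String) (orange_letters : List (String × List Int)) (red_or_orange_columns : List Int) (i : Int) (score : List String) : Decidable (Pre_add_letter_to_orange_letters trial_word specific_letter orange_letters red_or_orange_columns i score) := by unfold Pre_add_letter_to_orange_letters; infer_instance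

def pvWitness_add_letter_to_orange_letters : String × String × (List (String × List Int)) × List Int × Int × List String :=
  ("crane", "a", [("b", [0, 1])], [1, 2, 3], 2, ["Red", "Red", "Orange", "Red", "Red"])

def Spec_add_letter_to_orange_letters (trial_word : String) (specific_letter : String) (orange_letters : List (String × List Int)) (red_or_orange_columns : List Int) (i : Int) (score : List String) (out : List (String × List Int)) : Prop := out = add_letter_to_orange_letters_alt trial_word specific_letter orange_letters red_or_orange_columns i score
instance (trial_word : String) (specific_letter : String) (orange_letters : List (String × List Int)) (red_or_orange_columns : List Int) (i : Int) (score : List String) (out : List (String × List Int)) : Decidable (Spec_add_letter_to_orange_letters trial_word specific_letter orange_letters red_or_orange_columns i score out) := by unfold Spec_add_letter_to_orange_letters; infer_instance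

-- ===== CLAIM (what is proved, stated in full; the proofs are below) =====
def Claim_equal_add_letter_to_orange_letters : Prop := ∀ (trial_word : String) (specific_letter : String) (orange_letters : List (String × List Int)) (red_or_orange_columns : List Int) (i : Int) (score : List String), Dom_add_letter_to_orange_letters trial_word specific_letter orange_letters red_or_orange_columns i score → Pre_add_letter_to_orange_letters trial_word specific_letter orange_letters red_or_orange_columns i score → Spec_add_letter_to_orange_letters trial_word specific_letter orange_letters red_or_orange_columns i score (add_letter_to_orange_letters trial_word specific_letter orange_letters red_or_orange_columns i score)

-- ===== LEMMAS AND PROOFS =====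

-- A's scan over range(5) builds (locations, colours) for the repeat columns pvReps
lemma pv_scanA (w : List Char) (L : List Char) (i : Int) (score : List String) (h5 : 5 ≤ w.length) :
    (List.range 5).foldl (fun (acc : List Int × List String) (k : Nat) =>
      match PySem.List.pyGet? w (k : Int) with
      | none => acc
      | some ch =>
        if ([ch] == L) && (i != (k : Int)) then
          (acc.1 ++ [(k : Int)], acc.2 ++ [score.getD k ""])
        else acc) ([], [])
    = (((List.range 5).filter (fun k => ([w.getD k ' '] == L) && (i != (k : Int)))).map (fun (k : Nat) => (k : Int)),
       ((List.range 5).filter (fun k => ([w.getD k ' '] == L) && (i != (k : Int)))).map (fun k => score.getD k "")) := by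
  rw [PySem.List.foldl_congr_mem
    (g := fun (acc : List Int × List String) (k : Nat) =>
      ((fun (a : List Int) (k : Nat) => if ([w.getD k ' '] == L) && (i != (k : Int)) then a ++ [(k : Int)] else a) acc.1 k,
       (fun (a : List String) (k : Nat) => if ([w.getD k ' '] == L) && (i != (k : Int)) then a ++ [score.getD k ""] else a) acc.2 k))]
  · rw [PySem.List.foldl_prod_mk
      (f := fun (a : List Int) (k : Nat) => if ([w.getD k ' '] == L) && (i != (k : Int)) then a ++ [(k : Int)] else a)
      (g := fun (a : List String) (k : Nat) => if ([w.getD k ' '] == L) && (i != (k : Int)) then a ++ [score.getD k ""] else a)]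
    rw [PySem.List.foldl_append_if, PySem.List.foldl_append_if]
    simp only [List.nil_append]
  · intro acc k hk
    have hk5 : k < 5 := List.mem_range.mp hk
    have hlt : k < w.length := lt_of_lt_of_le hk5 h5
    have hget : PySem.List.pyGet? w (k : Int) = some (w.getD k ' ') := by
      rw [PySem.List.pyGet?_natCast, List.getElem?_eq_getElem hlt, List.getD_eq_getElem _ _ hlt]
    simp only [hget]
    split <;> rfl

-- A's count-indexed removal loop over the colours list is the plain removal fold over the
-- Orange/Red repeat columns
lemma pv_removal (f : Nat → String) (pre ks : List Nat) (o : Option (List Int)) :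
    ((ks.map f).foldl (fun (st : Nat × Option (List Int)) colour =>
        (st.1 + 1,
         if colour == "Orange" || colour == "Red" then
           match st.2 with
           | none => none
           | some l => PySem.List.remove? l (((pre ++ ks).map (fun (k : Nat) => (k : Int))).getD st.1 0)
         else st.2)) (pre.length, o)).2
    = (((ks.filter (fun k => f k == "Orange" || f k == "Red")).map (fun (k : Nat) => (k : Int))).foldl
        (fun ol c => ol.bind (fun l => PySem.List.remove? l c)) o) := by
  induction ks generalizing pre o with
  | nil => simp
  | cons k t ih =>
    have hloc : (((pre ++ k :: t).map (fun (k : Nat) => (k : Int))).getD pre.length 0) = (k : Int) := by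
      rw [List.getD_eq_getElem?_getD, List.map_append]
      rw [List.getElem?_append_right (by simp)]
      simp
    simp only [List.map_cons, List.foldl_cons, hloc, List.filter_cons]
    by_cases hOR : (f k == "Orange" || f k == "Red") = true
    · simp only [hOR, if_true]
      have hmatch : (match o with
          | none => none
          | some l => PySem.List.remove? l ((k : Int))) = o.bind (fun l => PySem.List.remove? l ((k : Int))) := by
        cases o <;> rfl
      rw [hmatch]
      have hpre : pre.length + 1 = (pre ++ [k]).length := by simp
      have happ : pre ++ k :: t = (pre ++ [k]) ++ t := by simp
      rw [hpre, happ, ih]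
      simp
    · simp only [Bool.not_eq_true] at hOR
      simp only [hOR, Bool.false_eq_true, if_false]
      have hpre : pre.length + 1 = (pre ++ [k]).length := by simp
      have happ : pre ++ k :: t = (pre ++ [k]) ++ t := by simp
      rw [hpre, happ, ih]

-- inserting a key and then erasing it is erasing it


lemma pv_erase_insert {κ ν : Type} [BEq κ] [LawfulBEq κ] (d : PySem.Dict κ ν) (k : κ) (v : ν) :
    (d.insert k v).erase k = d.erase k := by
  apply PySem.Dict.ext
  show (d.insert k v).items.filter (fun p => !(p.1 == k)) = d.items.filter (fun p => !(p.1 == k))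
  by_cases h : d.contains k = true
  · rw [PySem.Dict.items_insert_of_contains _ _ h, List.filter_map]
    rw [show ((fun p => !(p.1 == k)) ∘ (fun p => if (p.1 == k) = true then (k, v) else p))
        = (fun (p : κ × ν) => !(p.1 == k)) from ?_]
    · have hid : ∀ p ∈ d.items.filter (fun p => !(p.1 == k)),
          (fun p => if (p.1 == k) = true then (k, v) else p) p = id p := by
        intro p hp
        have := (List.mem_filter.mp hp).2
        by_cases hpk : (p.1 == k) = true
        · simp [hpk] at this
        · simp [hpk]
      rw [List.map_congr_left hid, List.map_id]
    · funext p
      by_cases hpk : (p.1 == k) = true <;> simp [hpk]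
  · rw [PySem.Dict.items_insert_of_not_contains _ _ (by simpa using h), List.filter_append]
    simp

lemma pv_foldl_erase_nil (l : List Int) : List.foldl List.erase ([] : List Int) l = [] := by
  induction l with
  | nil => rfl
  | cons a t ih => simpa using ih

lemma pv_foldl_erase_cons_not_mem (c : Int) (l : List Int) (t : List Int) (h : c ∉ l) :
    List.foldl List.erase (c :: t) l = c :: List.foldl List.erase t l := by
  induction l generalizing t with
  | nil => rfl
  | cons a s ih =>
    have hac : ¬ (c == a) = true := by
      simp only [beq_iff_eq]
      exact fun h' => h (h' ▸ List.mem_cons_self)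
    simp only [List.foldl_cons, List.erase_cons_tail hac]
    exact ih _ (fun h' => h (List.mem_cons_of_mem _ h'))

lemma pv_foldl_erase_mem (l : List Int) (c : Int) (hc : c ∈ l) (hnd : l.Nodup) (xs : List Int) :
    List.foldl List.erase xs l = List.foldl List.erase (xs.erase c) (l.erase c) := by
  induction l generalizing xs with
  | nil => cases hc
  | cons a t ih =>
    by_cases hac : a = c
    · subst hac
      rw [List.erase_cons_head]
      simp only [List.foldl_cons]
    · have hct : c ∈ t := (List.mem_cons.mp hc).resolve_left (fun h => hac h.symm)
      rw [List.erase_cons_tail (by simpa using hac)]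
      simp only [List.foldl_cons]
      rw [ih hct hnd.of_cons, List.erase_comm]

lemma pv_onePass (xs : List Int) (need : PySem.Set Int) (out0 : List Int) (hnd : need.Nodup) :
    (xs.foldl (fun (st : PySem.Set Int × List Int) c =>
      if PySem.Set.contains st.1 c then (PySem.Set.discard st.1 c, st.2)
      else (st.1, st.2 ++ [c])) (need, out0)).2
    = out0 ++ List.foldl List.erase xs need := by
  induction xs generalizing need out0 with
  | nil => simp [pv_foldl_erase_nil]
  | cons c t ih =>
    simp only [List.foldl_cons]
    by_cases h : c ∈ need
    · have hcont : PySem.Set.contains need c = true := by simpa using h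
      have hdis : PySem.Set.discard need c = need.erase c := by
        rw [List.Nodup.erase_eq_filter hnd c]
        show List.filter _ _ = List.filter _ _
        apply List.filter_congr
        intro x _
        by_cases hx : x = c <;> simp [hx, bne]
      rw [if_pos hcont, hdis, ih _ _ (hnd.erase c),
          pv_foldl_erase_mem need c h hnd (c :: t), List.erase_cons_head]
    · have hcont : PySem.Set.contains need c = false := by simpa using h
      rw [if_neg (by rw [hcont]; simp), ih _ _ hnd,
          pv_foldl_erase_cons_not_mem c need t h]
      simp

lemma pv_removeFold (cs : List Int) (xs : List Int) (hnd : cs.Nodup) (hmem : ∀ c ∈ cs, c ∈ xs) :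
    cs.foldl (fun ol c => ol.bind (fun l => PySem.List.remove? l c)) (some xs)
    = some (List.foldl List.erase xs cs) := by
  induction cs generalizing xs with
  | nil => rfl
  | cons c t ih =>
    simp only [List.foldl_cons, Option.bind_some,
      PySem.List.remove?_eq_some_erase xs c (hmem c List.mem_cons_self)]
    refine ih (xs.erase c) hnd.of_cons (fun c' hc' => ?_)
    have hne : c' ≠ c := by rintro rfl; exact (List.nodup_cons.mp hnd).1 hc'
    exact (List.mem_erase_of_ne hne).mpr (hmem c' (List.mem_cons_of_mem _ hc'))

-- (range 5).filter p shrinks to (range n).filter p when p only holds below n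
lemma pv_filter_range_shrink (p : Nat → Bool) (n : Nat) (hn : n ≤ 5)
    (h : ∀ k < 5, p k = true → k < n) :
    (List.range 5).filter p = (List.range n).filter p := by
  have h5 : 5 = n + (5 - n) := by omega
  rw [h5, List.range_add, List.filter_append]
  have hnil : ((List.range (5 - n)).map (n + ·)).filter p = [] := by
    rw [List.filter_eq_nil_iff]
    intro a ha
    obtain ⟨j, hj, rfl⟩ := List.mem_map.mp ha
    have hj5 : j < 5 - n := List.mem_range.mp hj
    intro hp
    exact absurd (h _ (by omega) hp) (by omega)
  rw [hnil, List.append_nil]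

-- B's comprehension over enumerate(zip(trial_word[:5], score)) lists exactly the pvReps columns
lemma pv_repsB (trial_word : String) (specific_letter : String) (i : Int) (score : List String)
    (h5 : 5 ≤ trial_word.toList.length)
    (hsc : ∀ k ∈ pvReps trial_word specific_letter i, k < score.length) :
    ((PySem.List.enumerate ((PySem.Str.slice trial_word none (some 5)).toList.zip score)).filter
        (fun p => ([p.2.1] == specific_letter.toList) && (p.1 != i))).map (fun p => (p.1, p.2.2))
    = (pvReps trial_word specific_letter i).map (fun (k : Nat) => ((k : Int), score.getD k "")) := by
  have hslice : (PySem.Str.slice trial_word none (some 5)).toList = trial_word.toList.take 5 := by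
    rw [PySem.Str.toList_slice, PySem.Chars.slice_eq_listSlice,
        PySem.List.slice_to _ (by norm_num)]
    rfl
  rw [hslice]
  have hlen : ((trial_word.toList.take 5).zip score).length = min 5 score.length := by
    simp only [List.length_zip, List.length_take]
    omega
  rw [PySem.List.enumerate_eq_map_pyRange _ (' ', ""), PySem.List.len_eq, hlen,
      PySem.List.pyRange_zero_natCast, List.map_map, List.filter_map, List.map_map]
  have hcond : ∀ k ∈ List.range (min 5 score.length),
      ((fun (p : Int × (Char × String)) => ([p.2.1] == specific_letter.toList) && (p.1 != i)) ∘
        ((fun j => (j, PySem.List.pyGetD ((trial_word.toList.take 5).zip score) j (' ', ""))) ∘ (fun (k : Nat) => (k : Int))))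
        k = (fun k => ([trial_word.toList.getD k ' '] == specific_letter.toList) && (i != (k : Int))) k := by
    intro k hk
    have hkn : k < min 5 score.length := List.mem_range.mp hk
    have hkw : k < trial_word.toList.length := by omega
    have hkz : k < ((trial_word.toList.take 5).zip score).length := by omega
    simp only [Function.comp, PySem.List.pyGetD_natCast]
    rw [List.getD_eq_getElem _ _ hkz, List.getElem_zip]
    rw [List.getD_eq_getElem _ _ hkw]
    have hbe : (((k : Int)) == i) = (i == ((k : Int))) := by
      by_cases h : ((k : Int)) = i
      · simp [h]
      · have h' : ¬ i = ((k : Int)) := fun hh => h hh.symm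
        simp [h, h']
    simp only [List.getElem_take, bne, hbe]
  rw [List.filter_congr hcond]
  have hshrink : (List.range 5).filter
        (fun k => ([trial_word.toList.getD k ' '] == specific_letter.toList) && (i != (k : Int)))
      = (List.range (min 5 score.length)).filter
        (fun k => ([trial_word.toList.getD k ' '] == specific_letter.toList) && (i != (k : Int))) := by
    apply pv_filter_range_shrink _ _ (by omega)
    intro k hk5 hp
    have hk : k ∈ pvReps trial_word specific_letter i := by
      unfold pvReps
      simp only [List.mem_filter, List.mem_range]
      exact ⟨hk5, hp⟩
    have := hsc k hk
    omega
  unfold pvReps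
  rw [hshrink]
  apply List.map_congr_left
  intro k hk
  have hkn : k < min 5 score.length := List.mem_range.mp (List.mem_filter.mp hk).1
  have hkz : k < ((trial_word.toList.take 5).zip score).length := by omega
  have hks : k < score.length := by omega
  simp only [Function.comp, PySem.List.pyGetD_natCast]
  rw [List.getD_eq_getElem _ _ hkz, List.getElem_zip, List.getD_eq_getElem _ _ hks]


-- ===== VERDICT (by name: the statement is the Claim_ definition above) =====
theorem add_letter_to_orange_letters_spec : Claim_equal_add_letter_to_orange_letters := by
  intro trial_word specific_letter orange_letters red_or_orange_columns i score _hdom hpre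
  obtain ⟨hi, hrest⟩ := hpre
  have hrem : PySem.List.remove? red_or_orange_columns i = some (red_or_orange_columns.erase i) :=
    PySem.List.remove?_eq_some_erase _ i hi
  show _ = _
  unfold add_letter_to_orange_letters add_letter_to_orange_letters_alt
  rw [hrem]
  simp only [PySem.Dict.insert_insert_self]
  by_cases hc : PySem.Str.count trial_word specific_letter > 1
  · obtain ⟨h5, hsc, hmemc⟩ := hrest hc
    simp only [hc, if_true]
    rw [pv_scanA trial_word.toList specific_letter.toList i score h5,
        pv_repsB trial_word specific_letter i score h5 hsc]
    unfold pvReps at *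
    set RR := (List.range 5).filter (fun k =>
      ([trial_word.toList.getD k ' '] == specific_letter.toList) && (i != (k : Int))) with hRR
    simp only []
    have hany : ((RR.map (fun (k : Nat) => ((k : Int), score.getD k ""))).any (fun p => p.2 == "Green"))
        = RR.any (fun k => score.getD k "" == "Green") := by
      rw [List.any_map]; rfl
    have hgreen : ("Green" ∈ RR.map (fun k => score.getD k ""))
        ↔ RR.any (fun k => score.getD k "" == "Green") = true := by
      simp only [List.mem_map, List.any_eq_true, beq_iff_eq]
    by_cases hG : "Green" ∈ RR.map (fun k => score.getD k "")
    · have hBt : ((RR.map (fun (k : Nat) => ((k : Int), score.getD k ""))).any (fun p => p.2 == "Green")) = true := by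
        rw [hany]; exact hgreen.mp hG
      conv_rhs => rw [if_pos hBt]
      conv_lhs => rw [if_pos hG, pv_erase_insert]
    · have hBf : ¬ ((RR.map (fun (k : Nat) => ((k : Int), score.getD k ""))).any (fun p => p.2 == "Green")) = true := by
        rw [hany]; exact fun h => hG (hgreen.mpr h)
      conv_rhs => rw [if_neg hBf]
      conv_lhs => rw [if_neg hG]
      -- no Green repeat: the Orange/Red repeat columns
      have hng : ¬ ∃ k ∈ RR, score.getD k "" = "Green" := by
        intro ⟨k, hk, hg⟩
        exact hG (List.mem_map.mpr ⟨k, hk, hg⟩)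
      have hmem' := hmemc hng
      have hndRR : RR.Nodup := (List.nodup_range).filter _
      have hndfil : (RR.filter (fun k => score.getD k "" == "Orange" || score.getD k "" == "Red")).Nodup :=
        hndRR.filter _
      have hndb : ((RR.filter (fun k => score.getD k "" == "Orange" || score.getD k "" == "Red")).map
          (fun (k : Nat) => (k : Int))).Nodup := hndfil.map Nat.cast_injective
      have hinb : i ∉ (RR.filter (fun k => score.getD k "" == "Orange" || score.getD k "" == "Red")).map
          (fun (k : Nat) => (k : Int)) := by
        intro h
        obtain ⟨k, hk, hki⟩ := List.mem_map.mp h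
        have hcond := (List.mem_filter.mp (List.mem_filter.mp hk).1).2
        simp only [Bool.and_eq_true] at hcond
        have := hcond.2
        simp only [bne_iff_ne, ne_eq] at this
        exact this hki.symm
      have hfil : ((RR.map (fun (k : Nat) => ((k : Int), score.getD k ""))).filter
            (fun p => p.2 == "Orange" || p.2 == "Red")).map (fun p => p.1)
          = (RR.filter (fun k => score.getD k "" == "Orange" || score.getD k "" == "Red")).map
            (fun (k : Nat) => (k : Int)) := by
        rw [List.filter_map, List.map_map]; rfl
      conv_rhs => rw [hfil, PySem.Set.ofList_eq_self_of_nodup _ hndb]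
      set bs := (RR.filter (fun k => score.getD k "" == "Orange" || score.getD k "" == "Red")).map
        (fun (k : Nat) => (k : Int)) with hbs
      have hadd : PySem.Set.add bs i = bs ++ [i] := PySem.Set.add_of_not_mem hinb
      have hndbi : (bs ++ [i]).Nodup := by
        simp only [List.nodup_append, List.nodup_singleton, true_and]
        refine ⟨hndb, ?_⟩
        intro a ha b hb heq
        rw [List.mem_singleton.mp hb] at heq
        subst heq
        exact hinb ha
      have hout : (red_or_orange_columns.foldl (fun (st : PySem.Set Int × List Int) c =>
            if PySem.Set.contains st.1 c then (PySem.Set.discard st.1 c, st.2)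
            else (st.1, st.2 ++ [c])) (PySem.Set.add bs i, [])).2
          = List.foldl List.erase (red_or_orange_columns.erase i) bs := by
        rw [hadd, pv_onePass red_or_orange_columns (bs ++ [i]) [] hndbi,
            pv_foldl_erase_mem (bs ++ [i]) i (List.mem_append_right _ List.mem_cons_self) hndbi,
            List.erase_append_right _ hinb, List.erase_cons_head, List.append_nil, List.nil_append]
      conv_rhs => rw [hout]
      -- A's removal loop
      have hmem'' : ∀ c ∈ bs, c ∈ red_or_orange_columns.erase i := by
        intro c hcb
        obtain ⟨k, hk, rfl⟩ := List.mem_map.mp hcb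
        have hk1 := List.mem_filter.mp hk
        have hcond := (List.mem_filter.mp hk1.1).2
        simp only [Bool.and_eq_true] at hcond
        have hne : i ≠ (k : Int) := by
          have := hcond.2
          simpa using this
        have hor : score.getD k "" = "Orange" ∨ score.getD k "" = "Red" := by
          have := hk1.2
          rcases Bool.or_eq_true_iff.mp this with h | h
          · exact Or.inl (by simpa using h)
          · exact Or.inr (by simpa using h)
        exact (List.mem_erase_of_ne (fun h => hne h.symm)).mpr (hmem' k hk1.1 hor)
      by_cases hOR : ("Orange" ∈ RR.map (fun k => score.getD k "")
          ∨ "Red" ∈ RR.map (fun k => score.getD k ""))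
      · conv_lhs => rw [if_pos hOR]
        have hrm := pv_removal (fun k => score.getD k "") [] RR
          (some (red_or_orange_columns.erase i))
        simp only [List.nil_append, List.length_nil] at hrm
        conv_lhs => rw [hrm, pv_removeFold bs (red_or_orange_columns.erase i) hndb hmem'']
      · conv_lhs => rw [if_neg hOR]
        have hempty : RR.filter (fun k => score.getD k "" == "Orange" || score.getD k "" == "Red") = [] := by
          rw [List.filter_eq_nil_iff]
          intro k hk hor
          rcases Bool.or_eq_true_iff.mp hor with h | h
          · exact hOR (Or.inl (List.mem_map.mpr ⟨k, hk, by simpa using h⟩))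
          · exact hOR (Or.inr (List.mem_map.mpr ⟨k, hk, by simpa using h⟩))
        have hbsnil : bs = [] := by rw [hbs, hempty, List.map_nil]
        rw [hbsnil, List.foldl_nil]
  · simp only [hc, if_false, List.any_nil, List.filter_nil, List.map_nil, Bool.false_eq_true]
    have haddnil : PySem.Set.add (PySem.Set.ofList ([] : List Int)) i = [i] := rfl
    rw [haddnil, pv_onePass red_or_orange_columns [i] [] (List.nodup_singleton i),
        List.nil_append, List.foldl_cons, List.foldl_nil]
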